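-- pv_equiv track=rewrite | github.com/jamestagal/pocket-agent-os | core/nodes/delegation.py | format_spec_context
-- ===== SOURCE A (Python) =====
-- from typing import Any, Dict, List, Optional
--
-- def format_spec_context(spec_files: Dict[str, str], spec_visuals: List[str], spec_path: str) -> str:
--     """
--     Format spec files into readable context for delegation.
--
--     Prioritizes key files and includes all available context.
--     """
--     sections = []
--
--     # Priority order for main files
--     priority_files = ["spec.md", "tasks.md", "requirements.md"]
--
--     # Add priority files first
--     for filename in priority_files:
--         if filename in spec_files:
--             content = spec_files[filename]
--             sections.append(f"### {filename}\n\n{content}")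
--
--     # Add other root-level markdown files
--     other_md_files = [f for f in spec_files.keys()
--                       if f.endswith('.md')
--                       and f not in priority_files
--                       and not f.startswith('planning/')]
--     for filename in sorted(other_md_files):
--         content = spec_files[filename]
--         sections.append(f"### {filename}\n\n{content}")
--
--     # Add planning files
--     planning_files = [f for f in spec_files.keys() if f.startswith('planning/')]
--     if planning_files:
--         sections.append("### Planning Documents\n")
--         for filename in sorted(planning_files):
--             content = spec_files[filename]
--             sections.append(f"#### {filename}\n\n{content}")
--
--     # Add yaml/yml config files
--     config_files = [f for f in spec_files.keys()
--                     if f.endswith('.yaml') or f.endswith('.yml')]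
--     for filename in sorted(config_files):
--         content = spec_files[filename]
--         sections.append(f"### {filename}\n\n```yaml\n{content}\n```")
--
--     # Note about visuals
--     if spec_visuals:
--         visual_list = "\n".join(f"- {v}" for v in spec_visuals)
--         sections.append(f"### Visual References\n\nThe following visual files are available in `{spec_path}/planning/visuals/`:\n{visual_list}")
--
--     return "\n\n---\n\n".join(sections)
-- ===== SOURCE B (Python) =====
-- def format_spec_context(spec_files, spec_visuals, spec_path):
--     """Decorate-sort-undecorate: one pass emits (rank, name, text) records for
--     every section, then ONE global sort on (rank, name) replaces A's staged
--     per-bucket builds and three separate sorts."""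
--     PRIORITY = {"spec.md": 0, "tasks.md": 1, "requirements.md": 2}
--     records = []
--     for fn, content in spec_files.items():
--         if fn in PRIORITY:
--             records.append((PRIORITY[fn], "", f"### {fn}\n\n{content}"))
--         elif fn.endswith(".md") and not fn.startswith("planning/"):
--             records.append((3, fn, f"### {fn}\n\n{content}"))
--         if fn.startswith("planning/"):
--             records.append((4, fn, f"#### {fn}\n\n{content}"))
--         if fn.endswith(".yaml") or fn.endswith(".yml"):
--             records.append((5, fn, f"### {fn}\n\n```yaml\n{content}\n```"))
--     if any(rank == 4 for rank, _, _ in records):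
--         records.append((4, "", "### Planning Documents\n"))
--     if spec_visuals:
--         visual_list = "\n".join(f"- {v}" for v in spec_visuals)
--         records.append((6, "", f"### Visual References\n\nThe following visual files are available in `{spec_path}/planning/visuals/`:\n{visual_list}"))
--     records.sort(key=lambda r: (r[0], r[1]))
--     return "\n\n---\n\n".join(text for _, _, text in records)
-- ===== Notes on version B (the rewrite author's own statement) =====
-- stated objective: alternative
-- what changed: A builds sections in five staged passes (priority loop, three key-comprehensions each followed by its own sorted() loop); B is a decorate-sort-undecorate schedule: one pass over the items emits labelled (rank, name, text) records (planning header and visuals appended as records too), then a single global sort on (rank, name) establishes the whole section order at once and the texts are joined.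
import Mathlib
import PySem

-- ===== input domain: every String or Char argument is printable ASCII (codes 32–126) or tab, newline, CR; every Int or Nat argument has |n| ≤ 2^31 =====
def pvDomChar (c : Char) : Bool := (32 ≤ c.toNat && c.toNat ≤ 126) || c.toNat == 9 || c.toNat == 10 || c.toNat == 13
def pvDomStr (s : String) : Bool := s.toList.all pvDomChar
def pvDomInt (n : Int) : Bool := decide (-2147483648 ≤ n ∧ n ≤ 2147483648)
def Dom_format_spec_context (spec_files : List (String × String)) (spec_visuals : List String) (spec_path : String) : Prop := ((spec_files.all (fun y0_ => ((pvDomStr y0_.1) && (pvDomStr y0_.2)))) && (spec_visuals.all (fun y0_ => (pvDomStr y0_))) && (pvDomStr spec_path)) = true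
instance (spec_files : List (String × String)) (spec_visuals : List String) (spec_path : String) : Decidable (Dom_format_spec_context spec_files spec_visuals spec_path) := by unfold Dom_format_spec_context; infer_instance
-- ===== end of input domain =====

-- B replaces A's five staged passes (priority loop + three key-comprehension/sort stages) by a
-- decorate-sort-undecorate schedule: one pass emits (rank, name, text) records and a single
-- global sort on (rank, name) fixes the whole section order; equal output is proved below.

-- ===== PORT A =====
-- A's three category predicates (A-side helpers)
def pvIsOtherMd (f : String) : Bool :=
  PySem.Str.endswith f ".md" && !(["spec.md", "tasks.md", "requirements.md"].contains f)
    && !(PySem.Str.startswith f "planning/")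
def pvIsPlanning (f : String) : Bool := PySem.Str.startswith f "planning/"
def pvIsConfig (f : String) : Bool := PySem.Str.endswith f ".yaml" || PySem.Str.endswith f ".yml"

-- spec_files[filename] is only reached when filename is a key, so getD never hits its default
def format_spec_context (spec_files : List (String × String)) (spec_visuals : List String) (spec_path : String) : String :=
  let d := PySem.Dict.ofList spec_files
  let priority_files : List String := ["spec.md", "tasks.md", "requirements.md"]
  let sections1 : List String := priority_files.foldl (fun acc filename =>
      if d.contains filename then acc ++ ["### " ++ filename ++ "\n\n" ++ d.getD filename ""] else acc) []
  let other_md_files := d.keys.filter pvIsOtherMd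
  let sections2 := (PySem.List.sorted other_md_files (fun x => x)).foldl (fun acc filename =>
      acc ++ ["### " ++ filename ++ "\n\n" ++ d.getD filename ""]) sections1
  let planning_files := d.keys.filter pvIsPlanning
  let sections3 := if planning_files.isEmpty then sections2 else
      (PySem.List.sorted planning_files (fun x => x)).foldl (fun acc filename =>
        acc ++ ["#### " ++ filename ++ "\n\n" ++ d.getD filename ""]) (sections2 ++ ["### Planning Documents\n"])
  let config_files := d.keys.filter pvIsConfig
  let sections4 := (PySem.List.sorted config_files (fun x => x)).foldl (fun acc filename =>
      acc ++ ["### " ++ filename ++ "\n\n```yaml\n" ++ d.getD filename "" ++ "\n```"]) sections3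
  let sections5 := if spec_visuals.isEmpty then sections4 else
      sections4 ++ ["### Visual References\n\nThe following visual files are available in `" ++ spec_path
        ++ "/planning/visuals/`:\n" ++ PySem.Str.join "\n" (spec_visuals.map (fun v => "- " ++ v))]
  PySem.Str.join "\n\n---\n\n" sections5

-- ===== PORT B =====
-- Source B's PRIORITY dict
def pvPRIORITY : PySem.Dict String Int :=
  PySem.Dict.ofList [("spec.md", 0), ("tasks.md", 1), ("requirements.md", 2)]

-- the body of Source B's `for fn, content in spec_files.items()` loop: appends one item's records
def pvEmitStep (recs : List (Int × String × String)) (fc : String × String) : List (Int × String × String) :=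
  let fn := fc.1
  let content := fc.2
  let recs := if pvPRIORITY.contains fn then
      recs ++ [(pvPRIORITY.getD fn 0, "", "### " ++ fn ++ "\n\n" ++ content)]
    else if PySem.Str.endswith fn ".md" && !PySem.Str.startswith fn "planning/" then
      recs ++ [((3 : Int), fn, "### " ++ fn ++ "\n\n" ++ content)]
    else recs
  let recs := if PySem.Str.startswith fn "planning/" then
      recs ++ [((4 : Int), fn, "#### " ++ fn ++ "\n\n" ++ content)] else recs
  if PySem.Str.endswith fn ".yaml" || PySem.Str.endswith fn ".yml" then
    recs ++ [((5 : Int), fn, "### " ++ fn ++ "\n\n```yaml\n" ++ content ++ "\n```")] else recs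

def format_spec_context_alt (spec_files : List (String × String)) (spec_visuals : List String) (spec_path : String) : String :=
  let d := PySem.Dict.ofList spec_files
  let records := d.items.foldl pvEmitStep []
  let records := if records.any (fun r => r.1 == 4) then
      records ++ [((4 : Int), "", "### Planning Documents\n")] else records
  let records := if spec_visuals.isEmpty then records else
      records ++ [((6 : Int), "", "### Visual References\n\nThe following visual files are available in `"
        ++ spec_path ++ "/planning/visuals/`:\n" ++ PySem.Str.join "\n" (spec_visuals.map (fun v => "- " ++ v)))]
  PySem.Str.join "\n\n---\n\n"
    ((PySem.List.sorted2 records (fun r => r.1) (fun r => r.2.1)).map (fun r => r.2.2))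

-- ===== PRECONDITION & SPEC =====
def Spec_format_spec_context (spec_files : List (String × String)) (spec_visuals : List String) (spec_path : String) (out : String) : Prop := out = format_spec_context_alt spec_files spec_visuals spec_path
instance (spec_files : List (String × String)) (spec_visuals : List String) (spec_path : String) (out : String) : Decidable (Spec_format_spec_context spec_files spec_visuals spec_path out) := by unfold Spec_format_spec_context; infer_instance

-- ===== CLAIM (what is proved, stated in full; the proofs are below) =====
def Claim_equal_format_spec_context : Prop := ∀ (spec_files : List (String × String)) (spec_visuals : List String) (spec_path : String), Dom_format_spec_context spec_files spec_visuals spec_path → Spec_format_spec_context spec_files spec_visuals spec_path (format_spec_context spec_files spec_visuals spec_path)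

-- ===== LEMMAS AND PROOFS =====
-- record builders (shared by the analysis of both ports)
def pvG0 (d : PySem.Dict String String) (k : String) : Int × String × String :=
  (pvPRIORITY.getD k 0, "", "### " ++ k ++ "\n\n" ++ d.getD k "")
def pvGM (d : PySem.Dict String String) (k : String) : Int × String × String :=
  (3, k, "### " ++ k ++ "\n\n" ++ d.getD k "")
def pvGP (d : PySem.Dict String String) (k : String) : Int × String × String :=
  (4, k, "#### " ++ k ++ "\n\n" ++ d.getD k "")
def pvGC (d : PySem.Dict String String) (k : String) : Int × String × String :=
  (5, k, "### " ++ k ++ "\n\n```yaml\n" ++ d.getD k "" ++ "\n```")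
def pvHdr : Int × String × String := (4, "", "### Planning Documents\n")
def pvVisRec (spec_visuals : List String) (spec_path : String) : Int × String × String :=
  (6, "", "### Visual References\n\nThe following visual files are available in `" ++ spec_path
      ++ "/planning/visuals/`:\n" ++ PySem.Str.join "\n" (spec_visuals.map (fun v => "- " ++ v)))

def pvEmit (fc : String × String) : List (Int × String × String) :=
  (if pvPRIORITY.contains fc.1 then
      [(pvPRIORITY.getD fc.1 0, "", "### " ++ fc.1 ++ "\n\n" ++ fc.2)]
    else if PySem.Str.endswith fc.1 ".md" && !PySem.Str.startswith fc.1 "planning/" then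
      [((3 : Int), fc.1, "### " ++ fc.1 ++ "\n\n" ++ fc.2)]
    else [])
  ++ (if PySem.Str.startswith fc.1 "planning/" then
      [((4 : Int), fc.1, "#### " ++ fc.1 ++ "\n\n" ++ fc.2)] else [])
  ++ (if PySem.Str.endswith fc.1 ".yaml" || PySem.Str.endswith fc.1 ".yml" then
      [((5 : Int), fc.1, "### " ++ fc.1 ++ "\n\n```yaml\n" ++ fc.2 ++ "\n```")] else [])

theorem pv_sorted2_eq_sorted_lex {A K1 K2 : Type} [LinearOrder K1] [LinearOrder K2]
    (xs : List A) (k1 : A → K1) (k2 : A → K2) :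
    PySem.List.sorted2 xs k1 k2 = PySem.List.sorted xs (fun x => toLex (k1 x, k2 x)) := by
  rw [PySem.List.sorted_eq_foldl_insertBy]
  show List.foldl _ [] xs = _
  congr 1
  funext acc x
  congr 1
  funext a b
  simp only [Prod.Lex.lt_iff]
  rcases lt_trichotomy (k1 a) (k1 b) with h | h | h <;>
    simp [h, not_lt.mpr h.le] <;> simp [h.ne']

theorem pv_emitStep_eq (recs : List (Int × String × String)) (fc : String × String) :
    pvEmitStep recs fc = recs ++ pvEmit fc := by
  simp only [pvEmitStep, pvEmit]
  split_ifs <;> simp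

theorem pv_foldl_emit (l : List (String × String)) :
    l.foldl pvEmitStep [] = l.flatMap pvEmit := by
  have h : ∀ acc : List (Int × String × String), l.foldl pvEmitStep acc = acc ++ l.flatMap pvEmit := by
    rw [show pvEmitStep = (fun acc x => acc ++ pvEmit x) from
      funext fun a => funext fun x => pv_emitStep_eq a x]
    intro acc; exact PySem.List.foldl_append_eq_flatMap pvEmit l acc
  simpa using h []

theorem pv_flatMap_append_perm {A B : Type} (l : List A) (f g : A → List B) :
    (l.flatMap fun x => f x ++ g x).Perm (l.flatMap f ++ l.flatMap g) := by
  induction l with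
  | nil => simp
  | cons a t ih =>
    simp only [List.flatMap_cons, List.append_assoc]
    refine ((ih.append_left _).append_left _).trans ?_
    have h1 : f a ++ (g a ++ (t.flatMap f ++ t.flatMap g))
        = f a ++ ((g a ++ t.flatMap f) ++ t.flatMap g) := by simp [List.append_assoc]
    have h2 : List.Perm (f a ++ ((g a ++ t.flatMap f) ++ t.flatMap g))
        (f a ++ ((t.flatMap f ++ g a) ++ t.flatMap g)) :=
      (List.perm_append_comm.append_right _).append_left _
    have h3 : f a ++ ((t.flatMap f ++ g a) ++ t.flatMap g)
        = f a ++ (t.flatMap f ++ (g a ++ t.flatMap g)) := by simp [List.append_assoc]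
    rw [h1, ← h3]; exact h2

theorem pv_flatMap_if {A B : Type} (l : List A) (p : A → Bool) (h : A → B) :
    (l.flatMap fun x => if p x then [h x] else []) = (l.filter p).map h := by
  induction l with
  | nil => rfl
  | cons a t ih => by_cases hp : p a <;> simp [hp, ih]

theorem pv_contains_PRI (k : String) :
    pvPRIORITY.contains k = (["spec.md", "tasks.md", "requirements.md"].contains k) := by
  rw [PySem.Dict.contains_eq_decide_mem_keys]
  have hk : pvPRIORITY.keys = ["spec.md", "tasks.md", "requirements.md"] := by rfl
  simp [hk]

theorem pv_planning_pos (k : String) (h : pvIsPlanning k = true) : ("" : String) < k := by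
  rw [String.lt_iff_toList_lt]
  have h' := h
  simp [pvIsPlanning, PySem.Str.startswith] at h'
  cases hk : k.toList with
  | nil => rw [hk] at h'; simp [PySem.Chars.startswith] at h'
  | cons c cs => exact List.nil_lt_cons c cs

-- one item's records, with the elif split into disjoint ifs (pvIsOtherMd is exactly
-- ".md, not priority, not planning/")
theorem pv_emit_split (d : PySem.Dict String String) (k : String) :
    pvEmit (k, d.getD k "")
      = (if (["spec.md", "tasks.md", "requirements.md"].contains k) then [pvG0 d k] else [])
        ++ ((if pvIsOtherMd k then [pvGM d k] else [])
        ++ ((if pvIsPlanning k then [pvGP d k] else [])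
        ++ (if pvIsConfig k then [pvGC d k] else []))) := by
  simp only [pvEmit, pvG0, pvGM, pvGP, pvGC, pvIsOtherMd, pvIsPlanning, pvIsConfig,
    pv_contains_PRI]
  cases hp : (["spec.md", "tasks.md", "requirements.md"].contains k) <;>
    cases hm : PySem.Str.endswith k ".md" <;>
    cases hpl : PySem.Str.startswith k "planning/" <;> simp [hp, hm, hpl]

-- the one-pass record fold, bucket-by-bucket (up to permutation)
theorem pv_records_perm (d : PySem.Dict String String) (hnd : d.keys.Nodup) :
    (d.items.foldl pvEmitStep []).Perm
      ((d.keys.filter (fun k => (["spec.md", "tasks.md", "requirements.md"].contains k))).map (pvG0 d)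
        ++ ((d.keys.filter pvIsOtherMd).map (pvGM d)
        ++ ((d.keys.filter pvIsPlanning).map (pvGP d)
        ++ (d.keys.filter pvIsConfig).map (pvGC d)))) := by
  rw [pv_foldl_emit, PySem.Dict.items_eq_map_keys d hnd "", List.flatMap_map]
  have he : (fun k => pvEmit (k, d.getD k ""))
      = fun k => (if (["spec.md", "tasks.md", "requirements.md"].contains k) then [pvG0 d k] else [])
        ++ ((if pvIsOtherMd k then [pvGM d k] else [])
        ++ ((if pvIsPlanning k then [pvGP d k] else [])
        ++ (if pvIsConfig k then [pvGC d k] else []))) := funext fun k => pv_emit_split d k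
  rw [he]
  refine (pv_flatMap_append_perm _ _ _).trans ?_
  rw [pv_flatMap_if]
  refine List.Perm.append_left _ ?_
  refine (pv_flatMap_append_perm _ _ _).trans ?_
  rw [pv_flatMap_if]
  refine List.Perm.append_left _ ?_
  refine (pv_flatMap_append_perm _ _ _).trans ?_
  rw [pv_flatMap_if, pv_flatMap_if]

-- the fully ordered record list (strictly increasing on (rank, name))
def pvT1 (d : PySem.Dict String String) : List (Int × String × String) :=
  (["spec.md", "tasks.md", "requirements.md"].filter (fun f => d.contains f)).map (pvG0 d)
def pvT2 (d : PySem.Dict String String) : List (Int × String × String) :=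
  (PySem.List.sorted (d.keys.filter pvIsOtherMd) (fun x => x)).map (pvGM d)
def pvT3 (d : PySem.Dict String String) : List (Int × String × String) :=
  (PySem.List.sorted (d.keys.filter pvIsPlanning) (fun x => x)).map (pvGP d)
def pvT4 (d : PySem.Dict String String) : List (Int × String × String) :=
  (PySem.List.sorted (d.keys.filter pvIsConfig) (fun x => x)).map (pvGC d)
def pvT (d : PySem.Dict String String) (spec_visuals : List String) (spec_path : String) :
    List (Int × String × String) :=
  pvT1 d ++ (pvT2 d
    ++ ((if (d.keys.filter pvIsPlanning).isEmpty then pvT3 d else pvHdr :: pvT3 d)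
    ++ (pvT4 d
    ++ (if spec_visuals.isEmpty then [] else [pvVisRec spec_visuals spec_path]))))

theorem pv_any4 (d : PySem.Dict String String) (hnd : d.keys.Nodup) :
    (d.items.foldl pvEmitStep []).any (fun r => r.1 == 4)
      = !(d.keys.filter pvIsPlanning).isEmpty := by
  rw [(pv_records_perm d hnd).any_eq]
  simp only [List.any_append, List.any_map]
  have h1 : (d.keys.filter (fun k => (["spec.md", "tasks.md", "requirements.md"].contains k))).any
      ((fun r => r.1 == 4) ∘ pvG0 d) = false := by
    rw [List.any_eq_false]
    intro k hk
    have := (List.mem_filter.mp hk).2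
    simp at this
    rcases this with h | h | h <;> simp [h, pvG0] <;> decide
  have h2 : (d.keys.filter pvIsOtherMd).any ((fun r => r.1 == 4) ∘ pvGM d) = false := by
    rw [List.any_eq_false]; intro k _; simp [pvGM]
  have h4 : (d.keys.filter pvIsConfig).any ((fun r => r.1 == 4) ∘ pvGC d) = false := by
    rw [List.any_eq_false]; intro k _; simp [pvGC]
  have h3 : (d.keys.filter pvIsPlanning).any ((fun r => r.1 == 4) ∘ pvGP d)
      = !(d.keys.filter pvIsPlanning).isEmpty := by
    cases hc : d.keys.filter pvIsPlanning with
    | nil => simp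
    | cons a t => simp [pvGP]
  rw [h1, h2, h3, h4]
  simp

-- membership rank facts
theorem pv_memT1 (d : PySem.Dict String String) {r : Int × String × String} (h : r ∈ pvT1 d) :
    (r.1 = 0 ∨ r.1 = 1 ∨ r.1 = 2) ∧ r.2.1 = "" := by
  simp only [pvT1, List.mem_map] at h
  obtain ⟨k, hk, rfl⟩ := h
  have := (List.mem_filter.mp hk).1
  simp at this
  rcases this with h | h | h <;> subst h <;> exact ⟨by simp only [pvG0]; decide, rfl⟩

theorem pv_memT2 (d : PySem.Dict String String) {r : Int × String × String} (h : r ∈ pvT2 d) :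
    r.1 = 3 := by
  simp only [pvT2, List.mem_map] at h; obtain ⟨k, _, rfl⟩ := h; rfl

theorem pv_memT3 (d : PySem.Dict String String) {r : Int × String × String} (h : r ∈ pvT3 d) :
    r.1 = 4 ∧ pvIsPlanning r.2.1 = true := by
  simp only [pvT3, List.mem_map, PySem.List.mem_sorted] at h
  obtain ⟨k, hk, rfl⟩ := h
  exact ⟨rfl, (List.mem_filter.mp hk).2⟩

theorem pv_memT4 (d : PySem.Dict String String) {r : Int × String × String} (h : r ∈ pvT4 d) :
    r.1 = 5 := by
  simp only [pvT4, List.mem_map] at h; obtain ⟨k, _, rfl⟩ := h; rfl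

-- strictly increasing names inside one sorted duplicate-free bucket
theorem pv_sorted_strict (l : List String) (hnd : l.Nodup) :
    (PySem.List.sorted l (fun x => x)).Pairwise (· < ·) := by
  have hle := PySem.List.sorted_pairwise l (fun x => x)
  have hne : (PySem.List.sorted l (fun x => x)).Nodup :=
    (PySem.List.sorted_perm l (fun x => x) false).symm.nodup hnd
  exact (hle.and hne).imp (fun h => lt_of_le_of_ne h.1 h.2)

theorem pv_pairwise_T (d : PySem.Dict String String) (hnd : d.keys.Nodup)
    (spec_visuals : List String) (spec_path : String) :
    (pvT d spec_visuals spec_path).Pairwise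
      (fun a b => toLex (a.1, a.2.1) < toLex (b.1, b.2.1)) := by
  have hlt : ∀ a b : Int × String × String,
      (a.1 < b.1 ∨ (a.1 = b.1 ∧ a.2.1 < b.2.1)) → toLex (a.1, a.2.1) < toLex (b.1, b.2.1) := by
    intro a b h; simpa [Prod.Lex.lt_iff] using h
  have hw1 : (pvT1 d).Pairwise (fun a b => toLex (a.1, a.2.1) < toLex (b.1, b.2.1)) := by
    simp only [pvT1]
    cases h1 : d.contains "spec.md" <;> cases h2 : d.contains "tasks.md" <;>
      cases h3 : d.contains "requirements.md" <;>
      simp [List.filter, h1, h2, h3, List.pairwise_cons, pvG0] <;> decide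
  have hw2 : (pvT2 d).Pairwise (fun a b => toLex (a.1, a.2.1) < toLex (b.1, b.2.1)) := by
    simp only [pvT2, List.pairwise_map]
    refine (pv_sorted_strict _ (hnd.filter _)).imp ?_
    intro a b h; exact hlt _ _ (Or.inr ⟨rfl, h⟩)
  have hw3 : (pvT3 d).Pairwise (fun a b => toLex (a.1, a.2.1) < toLex (b.1, b.2.1)) := by
    simp only [pvT3, List.pairwise_map]
    refine (pv_sorted_strict _ (hnd.filter _)).imp ?_
    intro a b h; exact hlt _ _ (Or.inr ⟨rfl, h⟩)
  have hw4 : (pvT4 d).Pairwise (fun a b => toLex (a.1, a.2.1) < toLex (b.1, b.2.1)) := by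
    simp only [pvT4, List.pairwise_map]
    refine (pv_sorted_strict _ (hnd.filter _)).imp ?_
    intro a b h; exact hlt _ _ (Or.inr ⟨rfl, h⟩)
  have hw3' : (if (d.keys.filter pvIsPlanning).isEmpty then pvT3 d else pvHdr :: pvT3 d).Pairwise
      (fun a b => toLex (a.1, a.2.1) < toLex (b.1, b.2.1)) := by
    split_ifs
    · exact hw3
    · refine List.Pairwise.cons ?_ hw3
      intro r hr
      obtain ⟨h4, hpl⟩ := pv_memT3 d hr
      exact hlt _ _ (Or.inr ⟨h4.symm, pv_planning_pos _ hpl⟩)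
  have hmem3' : ∀ r ∈ (if (d.keys.filter pvIsPlanning).isEmpty then pvT3 d else pvHdr :: pvT3 d),
      r.1 = 4 := by
    intro r hr
    split_ifs at hr
    · exact (pv_memT3 d hr).1
    · rcases hr with _ | hr
      · rfl
      · exact (pv_memT3 d (by assumption)).1
  have hwv : ∀ r ∈ (if spec_visuals.isEmpty then ([] : List (Int × String × String))
      else [pvVisRec spec_visuals spec_path]), r.1 = 6 := by
    intro r hr; split_ifs at hr
    · simp at hr
    · simp at hr; subst hr; rfl
  simp only [pvT]
  refine List.pairwise_append.mpr ⟨hw1, List.pairwise_append.mpr ⟨hw2,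
    List.pairwise_append.mpr ⟨hw3', List.pairwise_append.mpr ⟨hw4, ?_, ?_⟩, ?_⟩, ?_⟩, ?_⟩
  · -- pairwise of V
    split_ifs <;> simp
  · -- T4 vs V
    intro a ha b hb
    exact hlt _ _ (Or.inl (by rw [pv_memT4 d ha, hwv b hb]; norm_num))
  · -- hdr/T3 vs T4 ++ V
    intro a ha b hb
    rcases List.mem_append.mp hb with hb | hb
    · exact hlt _ _ (Or.inl (by rw [hmem3' a ha, pv_memT4 d hb]; norm_num))
    · exact hlt _ _ (Or.inl (by rw [hmem3' a ha, hwv b hb]; norm_num))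
  · -- T2 vs rest
    intro a ha b hb
    have h2 := pv_memT2 d ha
    rcases List.mem_append.mp hb with hb | hb
    · exact hlt _ _ (Or.inl (by rw [h2, hmem3' b hb]; norm_num))
    · rcases List.mem_append.mp hb with hb | hb
      · exact hlt _ _ (Or.inl (by rw [h2, pv_memT4 d hb]; norm_num))
      · exact hlt _ _ (Or.inl (by rw [h2, hwv b hb]; norm_num))
  · -- T1 vs rest
    intro a ha b hb
    obtain ⟨h1, _⟩ := pv_memT1 d ha
    have hle2 : a.1 ≤ 2 := by rcases h1 with h | h | h <;> rw [h] <;> norm_num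
    rcases List.mem_append.mp hb with hb | hb
    · exact hlt _ _ (Or.inl (by rw [pv_memT2 d hb]; omega))
    · rcases List.mem_append.mp hb with hb | hb
      · exact hlt _ _ (Or.inl (by rw [hmem3' b hb]; omega))
      · rcases List.mem_append.mp hb with hb | hb
        · exact hlt _ _ (Or.inl (by rw [pv_memT4 d hb]; omega))
        · exact hlt _ _ (Or.inl (by rw [hwv b hb]; omega))

theorem pv_T1_perm (d : PySem.Dict String String) (hnd : d.keys.Nodup) :
    (pvT1 d).Perm ((d.keys.filter (fun k =>
      (["spec.md", "tasks.md", "requirements.md"].contains k))).map (pvG0 d)) := by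
  refine List.Perm.map _ ?_
  have hpn : (["spec.md", "tasks.md", "requirements.md"] : List String).Nodup := by decide
  refine (List.perm_ext_iff_of_nodup (hpn.filter _) (hnd.filter _)).mpr ?_
  intro k
  simp only [List.mem_filter, PySem.Dict.contains_iff_mem_keys, List.contains_iff_mem,
    decide_eq_true_eq, List.mem_cons]
  constructor
  · rintro ⟨h1, h2⟩; exact ⟨h2, by simpa using h1⟩
  · rintro ⟨h1, h2⟩; exact ⟨by simpa using h2, h1⟩

-- reassembly of the four buckets plus optional header and visuals records
theorem pv_assemble_hdr {A : Type} (M1 M2 M3 M4 T1 T2 T3 T4 E : List A) (hdr : A)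
    (p1 : T1.Perm M1) (p2 : T2.Perm M2) (p3 : T3.Perm M3) (p4 : T4.Perm M4) :
    (T1 ++ (T2 ++ ((hdr :: T3) ++ (T4 ++ E)))).Perm
      ((M1 ++ (M2 ++ (M3 ++ M4))) ++ [hdr] ++ E) := by
  have step1 : (T1 ++ (T2 ++ ((hdr :: T3) ++ (T4 ++ E)))).Perm
      (M1 ++ (M2 ++ (hdr :: (M3 ++ (M4 ++ E))))) := by
    refine p1.append ?_
    refine p2.append ?_
    show (hdr :: (T3 ++ (T4 ++ E))).Perm _
    exact (p3.append (p4.append (List.Perm.refl E))).cons hdr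
  refine step1.trans ?_
  have : (M1 ++ (M2 ++ (M3 ++ M4))) ++ [hdr] ++ E
      = M1 ++ (M2 ++ ((M3 ++ M4) ++ hdr :: E)) := by simp [List.append_assoc]
  rw [this]
  refine List.Perm.append_left _ (List.Perm.append_left _ ?_)
  have : M3 ++ (M4 ++ E) = (M3 ++ M4) ++ E := by simp [List.append_assoc]
  rw [this]
  exact List.perm_middle.symm

theorem pv_assemble_nohdr {A : Type} (M1 M2 M3 M4 T1 T2 T3 T4 E : List A)
    (p1 : T1.Perm M1) (p2 : T2.Perm M2) (p3 : T3.Perm M3) (p4 : T4.Perm M4) :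
    (T1 ++ (T2 ++ (T3 ++ (T4 ++ E)))).Perm ((M1 ++ (M2 ++ (M3 ++ M4))) ++ E) := by
  have : (M1 ++ (M2 ++ (M3 ++ M4))) ++ E = M1 ++ (M2 ++ (M3 ++ (M4 ++ E))) := by
    simp [List.append_assoc]
  rw [this]
  exact p1.append (p2.append (p3.append (p4.append (List.Perm.refl E))))

theorem pv_A_eq (spec_files : List (String × String)) (spec_visuals : List String) (spec_path : String) :
    format_spec_context spec_files spec_visuals spec_path
      = PySem.Str.join "\n\n---\n\n"
          ((pvT (PySem.Dict.ofList spec_files) spec_visuals spec_path).map (fun r => r.2.2)) := by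
  unfold format_spec_context
  simp only [PySem.List.foldl_append_if, PySem.List.foldl_append_singleton_eq_map, List.nil_append]
  congr 1
  simp only [pvT, pvT1, pvT2, pvT3, pvT4, pvG0, pvGM, pvGP, pvGC, pvHdr, pvVisRec,
    List.map_append, List.map_map, Function.comp_def]
  split_ifs <;> simp_all [List.append_assoc, List.isEmpty_iff, PySem.List.sorted_eq_nil_iff,
    pvG0, pvGM, pvGP, pvGC]

theorem pv_B_eq (spec_files : List (String × String)) (spec_visuals : List String) (spec_path : String) :
    format_spec_context_alt spec_files spec_visuals spec_path
      = PySem.Str.join "\n\n---\n\n"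
          ((pvT (PySem.Dict.ofList spec_files) spec_visuals spec_path).map (fun r => r.2.2)) := by
  unfold format_spec_context_alt
  have hnd := PySem.Dict.nodup_keys_ofList spec_files
  set d := PySem.Dict.ofList spec_files with hd
  simp only [pv_any4 d hnd]
  congr 1
  congr 1
  rw [pv_sorted2_eq_sorted_lex]
  have hM := pv_records_perm d hnd
  have p1 := pv_T1_perm d hnd
  have p2 : (pvT2 d).Perm ((d.keys.filter pvIsOtherMd).map (pvGM d)) :=
    (PySem.List.sorted_perm _ _ false).map _
  have p3 : (pvT3 d).Perm ((d.keys.filter pvIsPlanning).map (pvGP d)) :=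
    (PySem.List.sorted_perm _ _ false).map _
  have p4 : (pvT4 d).Perm ((d.keys.filter pvIsConfig).map (pvGC d)) :=
    (PySem.List.sorted_perm _ _ false).map _
  have hpair := pv_pairwise_T d hnd spec_visuals spec_path
  by_cases hpl : (d.keys.filter pvIsPlanning).isEmpty <;>
    by_cases hv : spec_visuals.isEmpty <;>
    simp only [hpl, hv, Bool.not_true, Bool.not_false, if_true, if_false, Bool.false_eq_true,
      not_true, not_false_iff, ite_true, ite_false] <;>
    refine PySem.List.sorted_eq_of_perm_of_pairwise_lt _ _ _ ?_ hpair
  · -- no header, no visuals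
    refine List.Perm.trans ?_ hM.symm
    simpa [pvT, hpl, hv] using pv_assemble_nohdr _ _ _ _ _ _ _ _ [] p1 p2 p3 p4
  · -- no header, visuals
    refine List.Perm.trans ?_ (hM.symm.append_right [pvVisRec spec_visuals spec_path])
    simpa [pvT, hpl, hv, pvVisRec] using
      pv_assemble_nohdr _ _ _ _ _ _ _ _ [pvVisRec spec_visuals spec_path] p1 p2 p3 p4
  · -- header, no visuals
    refine List.Perm.trans ?_ (hM.symm.append_right [pvHdr])
    simpa [pvT, hpl, hv, pvHdr] using pv_assemble_hdr _ _ _ _ _ _ _ _ [] pvHdr p1 p2 p3 p4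
  · -- header and visuals
    refine List.Perm.trans ?_ ((hM.symm.append_right [pvHdr]).append_right
      [pvVisRec spec_visuals spec_path])
    simpa [pvT, hpl, hv, pvHdr, pvVisRec] using
      pv_assemble_hdr _ _ _ _ _ _ _ _ [pvVisRec spec_visuals spec_path] pvHdr p1 p2 p3 p4

-- ===== VERDICT (by name: the statement is the Claim_ definition above) =====
theorem format_spec_context_spec : Claim_equal_format_spec_context := by
  intro spec_files spec_visuals spec_path _
  unfold Spec_format_spec_context
  rw [pv_A_eq, pv_B_eq]
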